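-- pv_equiv track=rewrite | github.com/TimMeiwald/ELFGenerator | elfgenerator/Binary.py | __hex_bytes_to_hex_byte_array
-- ===== SOURCE A (Python) =====
-- def __hex_bytes_to_hex_byte_array(hex_value):
--     hex_value = hex_value[2:]
--     length = len(hex_value)
--     byte_array = []
--     if(len(hex_value) % 2 == 0):
--         pass
--     else:
--         hex_value = "0" + hex_value
--     for index in range(0, length, 2):
--         byte_array.append("0x" + hex_value[index:index+2])
--     hex_value = byte_array
--     return hex_value
-- ===== SOURCE B (Python) =====
-- def __hex_bytes_to_hex_byte_array(hex_value):
--     s = hex_value[2:]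
--     out = []
--     i = len(s)
--     while i > 0:
--         pair = s[max(i - 2, 0):i]
--         if len(pair) == 1:
--             pair = "0" + pair
--         out.append("0x" + pair)
--         i -= 2
--     out.reverse()
--     return out
-- ===== Notes on version B (the rewrite author's own statement) =====
-- stated objective: alternative
-- what changed: B scans the digits back-to-front in steps of two with an explicit index, padding only the final leftover single digit, then reverses the collected list, instead of A's pad-up-front then left-to-right range slicing.
import Mathlib
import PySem

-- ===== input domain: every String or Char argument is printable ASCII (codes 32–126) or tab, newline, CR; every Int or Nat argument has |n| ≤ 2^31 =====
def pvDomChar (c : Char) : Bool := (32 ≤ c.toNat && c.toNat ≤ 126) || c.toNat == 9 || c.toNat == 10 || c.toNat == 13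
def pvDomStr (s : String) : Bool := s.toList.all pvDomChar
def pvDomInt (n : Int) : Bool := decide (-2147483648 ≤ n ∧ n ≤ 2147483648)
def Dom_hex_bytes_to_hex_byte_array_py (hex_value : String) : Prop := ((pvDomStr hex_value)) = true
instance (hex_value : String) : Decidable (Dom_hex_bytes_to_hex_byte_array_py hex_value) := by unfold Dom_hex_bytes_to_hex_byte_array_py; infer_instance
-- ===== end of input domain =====

-- B scans the digits back-to-front in steps of two, padding only the final leftover
-- single digit, then reverses the collected list — a different decomposition of the
-- same O(n) task (A pads up front and slices left-to-right over range(0, length, 2)).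

-- ===== PORT A =====
def hex_bytes_to_hex_byte_array_py (hex_value : String) : List String :=
  let hv := PySem.List.slice hex_value.toList (some 2) none      -- hex_value = hex_value[2:]
  let length := hv.length
  let hv2 := if length % 2 = 0 then hv else '0' :: hv            -- front padding branch
  (PySem.List.pyRange 0 (length : Int) 2).foldl                  -- for index in range(0, length, 2)
    (fun acc index =>
      acc ++ [String.ofList (['0', 'x'] ++ PySem.List.slice hv2 (some index) (some (index + 2)))]) []

-- ===== PORT B =====
-- the while loop of Source B: i counts down from len(s) in steps of 2, appending to out
def hexAltLoop (s : List Char) (i : Nat) (out : List String) : List String :=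
  if i = 0 then out
  else
    let pair := PySem.List.slice s (some (max ((i : Int) - 2) 0)) (some (i : Int))
    let pair := if pair.length = 1 then '0' :: pair else pair
    hexAltLoop s (i - 2) (out ++ [String.ofList ('0' :: 'x' :: pair)])
termination_by i

def hex_bytes_to_hex_byte_array_py_alt (hex_value : String) : List String :=
  let s := PySem.List.slice hex_value.toList (some 2) none
  (hexAltLoop s s.length []).reverse

-- ===== PRECONDITION & SPEC =====
def Spec_hex_bytes_to_hex_byte_array_py (hex_value : String) (out : List String) : Prop := out = hex_bytes_to_hex_byte_array_py_alt hex_value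
instance (hex_value : String) (out : List String) : Decidable (Spec_hex_bytes_to_hex_byte_array_py hex_value out) := by unfold Spec_hex_bytes_to_hex_byte_array_py; infer_instance

-- ===== CLAIM (what is proved, stated in full; the proofs are below) =====
def Claim_equal_hex_bytes_to_hex_byte_array_py : Prop := ∀ (hex_value : String), Dom_hex_bytes_to_hex_byte_array_py hex_value → Spec_hex_bytes_to_hex_byte_array_py hex_value (hex_bytes_to_hex_byte_array_py hex_value)

-- ===== LEMMAS AND PROOFS =====

-- the common middle ground: the even-length padded digit list, chunked in pairs
def hexPad (q : List Char) : List Char := if q.length % 2 = 0 then q else '0' :: q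

def hexChunk2 : List Char → List String
  | a :: b :: rest => String.ofList ['0', 'x', a, b] :: hexChunk2 rest
  | _ => []

theorem hexPad_length_even (q : List Char) : (hexPad q).length % 2 = 0 := by
  unfold hexPad
  split
  · omega
  · simp only [List.length_cons]; omega

theorem hexPad_append (q r : List Char) (hr : r.length % 2 = 0) :
    hexPad (q ++ r) = hexPad q ++ r := by
  unfold hexPad
  simp only [List.length_append]
  split_ifs <;> simp_all <;> omega

theorem hexChunk2_append (q r : List Char) (h : q.length % 2 = 0) :
    hexChunk2 (q ++ r) = hexChunk2 q ++ hexChunk2 r := by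
  induction q using hexChunk2.induct with
  | case1 a b rest ih =>
    simp only [List.cons_append, hexChunk2, List.length_cons] at *
    rw [ih (by omega)]
  | case2 q h2 =>
    rcases q with _ | ⟨a, _ | ⟨b, t⟩⟩
    · simp [hexChunk2]
    · simp at h
    · exact absurd rfl (h2 a b t)

-- A's range loop over the padded list is exactly the pair chunking
theorem aLoop_eq (p : List Char) (h : p.length % 2 = 0) (m : Nat) (hm : m = p.length / 2) :
    (List.range m).map (fun k => String.ofList (['0', 'x'] ++ (p.drop (2 * k)).take 2)) = hexChunk2 p := by
  induction p using hexChunk2.induct generalizing m with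
  | case1 a b rest ih =>
    subst hm
    simp only [List.length_cons] at *
    have hdiv : (rest.length + 1 + 1) / 2 = rest.length / 2 + 1 := by omega
    rw [hdiv, List.range_succ_eq_map, List.map_cons, List.map_map]
    simp only [hexChunk2]
    refine congrArg₂ List.cons (by simp) ?_
    rw [← ih (by omega) _ rfl]
    apply List.map_congr_left
    intro k hk
    simp only [Function.comp, Nat.mul_succ]
    have hdrop : List.drop (2 * k + 2) (a :: b :: rest) = List.drop (2 * k) rest := by
      rw [show 2 * k + 2 = (2 * k) + 1 + 1 by ring]
      simp [List.drop_succ_cons]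
    simp [hdrop]
  | case2 q h2 =>
    rcases q with _ | ⟨a, _ | ⟨b, t⟩⟩
    · subst hm; simp [hexChunk2]
    · simp at h
    · exact absurd rfl (h2 a b t)

-- B's countdown loop builds the same chunking, in reverse order
theorem bLoop_eq (s : List Char) : ∀ i, i ≤ s.length → ∀ out,
    hexAltLoop s i out = out ++ (hexChunk2 (hexPad (s.take i))).reverse := by
  intro i
  induction i using Nat.strong_induction_on with
  | _ i ih =>
    intro hi out
    rw [hexAltLoop]
    by_cases h0 : i = 0
    · subst h0; simp [hexPad, hexChunk2]
    · simp only [if_neg h0]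
      by_cases h1 : i = 1
      · subst h1
        have hsl : PySem.List.slice s (some (max (((1 : Nat) : Int) - 2) 0)) (some ((1 : Nat) : Int)) =
            s.take 1 := by
          rw [show max (((1 : Nat) : Int) - 2) 0 = (0 : Int) by norm_num]
          rw [PySem.List.slice_zero_start, PySem.List.slice_to _ (by norm_num)]
          norm_num
        rw [hsl]
        rcases s with _ | ⟨c, t⟩
        · simp at hi
        · rw [show List.take 1 (c :: t) = [c] from rfl]
          rw [show (1 - 2 : Nat) = 0 from rfl, hexAltLoop]
          norm_num [hexPad, hexChunk2]
      · -- i ≥ 2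
        obtain ⟨j, rfl⟩ : ∃ j, i = j + 2 := ⟨i - 2, by omega⟩
        have hmax : max (((j + 2 : Nat) : Int) - 2) 0 = ((j : Nat) : Int) := by push_cast; omega
        rw [hmax]
        have hsl : PySem.List.slice s (some ((j : Nat) : Int)) (some ((j + 2 : Nat) : Int)) =
            (s.drop j).take 2 := by
          rw [show ((j + 2 : Nat) : Int) = ((j : Nat) : Int) + ((2 : Nat) : Int) by push_cast; ring]
          exact PySem.List.slice_natCast_add s j 2
        rw [hsl]
        have hlen2 : ((s.drop j).take 2).length = 2 := by
          simp only [List.length_take, List.length_drop]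
          omega
        rw [if_neg (by omega)]
        rw [show j + 2 - 2 = j by omega]
        rw [ih j (by omega) (by omega)]
        obtain ⟨a, b, hab⟩ : ∃ a b, (s.drop j).take 2 = [a, b] := by
          rcases h2 : (s.drop j).take 2 with _ | ⟨a, _ | ⟨b, _ | _⟩⟩ <;> simp [h2] at hlen2 ⊢
        have htake : s.take (j + 2) = s.take j ++ [a, b] := by
          rw [List.take_add, hab]
        rw [htake, hexPad_append _ _ (by simp), hexChunk2_append _ _ (hexPad_length_even _)]
        rw [hab]
        simp [hexChunk2]

-- ===== VERDICT (by name: the statement is the Claim_ definition above) =====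
theorem hex_bytes_to_hex_byte_array_py_spec : Claim_equal_hex_bytes_to_hex_byte_array_py := by
  intro hv _
  unfold Spec_hex_bytes_to_hex_byte_array_py hex_bytes_to_hex_byte_array_py hex_bytes_to_hex_byte_array_py_alt
  set s := PySem.List.slice hv.toList (some 2) none with hs
  simp only
  rw [bLoop_eq s s.length le_rfl [], List.take_length, List.nil_append, List.reverse_reverse]
  rw [PySem.List.pyRange_of_pos 0 (s.length : Int) (by norm_num)]
  rw [PySem.List.foldl_append_singleton_eq_map, List.map_map]
  have hm : (if (0 : Int) < (s.length : Int) then (((s.length : Int) - 0 + 2 - 1) / 2).toNat else 0) =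
      (hexPad s).length / 2 := by
    unfold hexPad
    by_cases hp : 0 < s.length
    · rw [if_pos (by omega)]
      rw [show ((s.length : Int) - 0 + 2 - 1) = ((s.length + 1 : Nat) : Int) by push_cast; ring]
      rw [show (2 : Int) = ((2 : Nat) : Int) by norm_num, ← Int.natCast_div, Int.toNat_natCast]
      split
      · omega
      · simp only [List.length_cons]
    · rw [if_neg (by omega), if_pos (by omega)]
      omega
  rw [hm]
  rw [← aLoop_eq (hexPad s) (hexPad_length_even s) _ rfl]
  apply List.map_congr_left
  intro k hk
  simp only [Function.comp]
  rw [show ((0 : Int) + 2 * (k : Int)) = ((2 * k : Nat) : Int) by push_cast; ring]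
  rw [show ((2 * k : Nat) : Int) + 2 = ((2 * k : Nat) : Int) + ((2 : Nat) : Int) by push_cast; ring]
  rw [PySem.List.slice_natCast_add]
  rfl
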